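-- pv_equiv track=rewrite | github.com/reddykr69/design-analysis-of-algorithm | assignments/ASSIGNMENT 6/4. Difference Between Ones and Zeros in Row and Colum.py | differenceOnesZeros
-- ===== SOURCE A (Python) =====
-- def differenceOnesZeros(matrix):
--     rows = len(matrix)
--     cols = len(matrix[0])
--
--     row_ones = [0] * rows
--     row_zeros = [0] * rows
--     col_ones = [0] * cols
--     col_zeros = [0] * cols
--
--     for i in range(rows):
--         for j in range(cols):
--             if matrix[i][j] == 1:
--                 row_ones[i] += 1
--                 col_ones[j] += 1
--             else:
--                 row_zeros[i] += 1
--                 col_zeros[j] += 1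
--
--     result = [[0] * cols for _ in range(rows)]
--     for i in range(rows):
--         for j in range(cols):
--             result[i][j] = (row_ones[i] + col_ones[j]) - (row_zeros[i] + col_zeros[j])
--
--     return result
-- ===== SOURCE B (Python) =====
-- def differenceOnesZeros(matrix):
--     cols = len(matrix[0])
--     def sign(v):
--         return 1 if v == 1 else -1
--     return [[sum(sign(v) for v in row[:cols]) + sum(sign(r[j]) for r in matrix)
--              for j in range(cols)]
--             for row in matrix]
-- ===== Notes on version B (the rewrite author's own statement) =====
-- stated objective: alternative
-- what changed: B has no counting phase and no counter arrays at all: each cell is computed directly from the definition as the sum of signed contributions (+1 for a 1, -1 for anything else) over its row and its column, instead of A's two-phase precomputation of four per-row/per-column counters; it trades O(rows*cols*(rows+cols)) time for zero auxiliary state.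
import Mathlib
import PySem

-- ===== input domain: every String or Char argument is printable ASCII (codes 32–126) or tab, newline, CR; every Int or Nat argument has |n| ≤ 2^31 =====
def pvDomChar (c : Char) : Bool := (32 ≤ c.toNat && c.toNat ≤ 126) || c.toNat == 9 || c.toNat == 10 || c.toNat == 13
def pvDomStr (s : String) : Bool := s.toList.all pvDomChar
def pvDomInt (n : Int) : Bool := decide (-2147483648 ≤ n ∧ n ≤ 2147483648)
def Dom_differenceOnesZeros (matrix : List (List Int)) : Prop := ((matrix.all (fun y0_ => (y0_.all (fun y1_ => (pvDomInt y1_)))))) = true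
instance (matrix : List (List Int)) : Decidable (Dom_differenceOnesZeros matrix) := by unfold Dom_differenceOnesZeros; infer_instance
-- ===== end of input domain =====

-- B drops A's two-phase counting (four per-row/per-column counter arrays) entirely and
-- computes each cell directly from the definition, as the sum of signed contributions
-- (+1 for a 1, -1 otherwise) over that cell's row and column; objective: alternative.

-- ===== PORT A =====
-- one body of A's inner loop; matrix[i][j] is in range on every iteration under
-- Pre_differenceOnesZeros, so the getD defaults are never used there
def pvStepA (matrix : List (List Int)) (i : Nat)
    (s : List Int × List Int × List Int × List Int) (j : Nat) :
    List Int × List Int × List Int × List Int :=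
  if (matrix.getD i []).getD j 0 = 1 then
    (s.1.set i (s.1.getD i 0 + 1), s.2.1, s.2.2.1.set j (s.2.2.1.getD j 0 + 1), s.2.2.2)
  else
    (s.1, s.2.1.set i (s.2.1.getD i 0 + 1), s.2.2.1, s.2.2.2.set j (s.2.2.2.getD j 0 + 1))

def differenceOnesZeros (matrix : List (List Int)) : List (List Int) :=
  let rows := matrix.length
  let cols := (matrix.getD 0 []).length
  -- the four counter arrays (row_ones, row_zeros, col_ones, col_zeros), filled by the nested loop
  let s := (List.range rows).foldl
    (fun s i => (List.range cols).foldl (pvStepA matrix i) s)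
    (List.replicate rows (0:Int), List.replicate rows (0:Int),
     List.replicate cols (0:Int), List.replicate cols (0:Int))
  (List.range rows).map (fun i => (List.range cols).map (fun j =>
    (s.1.getD i 0 + s.2.2.1.getD j 0) - (s.2.1.getD i 0 + s.2.2.2.getD j 0)))

-- ===== PORT B =====
-- Source B's helper sign(v)
def pvSign (v : Int) : Int := if v = 1 then 1 else -1

-- Source B: per-cell sum of sign over row[:cols] plus sum of sign over the column.
-- row[:cols] with cols ≥ 0 is List.take cols (exact); r[j] is in range under
-- Pre_differenceOnesZeros, so getD's default is never used there
def differenceOnesZeros_alt (matrix : List (List Int)) : List (List Int) :=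
  let cols := (matrix.getD 0 []).length
  matrix.map (fun row => (List.range cols).map (fun j =>
    ((row.take cols).map pvSign).sum + (matrix.map (fun r => pvSign (r.getD j 0))).sum))

-- ===== PRECONDITION & SPEC =====
-- Pre_ excludes exactly the inputs on which A raises IndexError: the empty matrix
-- (len(matrix[0])) and ragged matrices whose later rows are shorter than the first row.
def Pre_differenceOnesZeros (matrix : List (List Int)) : Prop :=
  matrix ≠ [] ∧ ∀ row ∈ matrix, (matrix.getD 0 []).length ≤ row.length
instance (matrix : List (List Int)) : Decidable (Pre_differenceOnesZeros matrix) := by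
  unfold Pre_differenceOnesZeros; infer_instance

def pvWitness_differenceOnesZeros : List (List Int) := [[1, 0], [0, 1]]

def Spec_differenceOnesZeros (matrix : List (List Int)) (out : List (List Int)) : Prop := out = differenceOnesZeros_alt matrix
instance (matrix : List (List Int)) (out : List (List Int)) : Decidable (Spec_differenceOnesZeros matrix out) := by unfold Spec_differenceOnesZeros; infer_instance

-- ===== CLAIM (what is proved, stated in full; the proofs are below) =====
def Claim_equal_differenceOnesZeros : Prop := ∀ (matrix : List (List Int)), Dom_differenceOnesZeros matrix → Pre_differenceOnesZeros matrix → Spec_differenceOnesZeros matrix (differenceOnesZeros matrix)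

-- ===== LEMMAS AND PROOFS =====

-- number of ones / non-ones among positions j < m of row i (read with default 0)
def cntRow (matrix : List (List Int)) (m i : Nat) : Nat :=
  (List.range m).countP (fun j => (matrix.getD i []).getD j 0 == 1)
def cntRowZ (matrix : List (List Int)) (m i : Nat) : Nat :=
  (List.range m).countP (fun j => !((matrix.getD i []).getD j 0 == 1))
def cntCol (matrix : List (List Int)) (n j : Nat) : Nat :=
  (List.range n).countP (fun i => (matrix.getD i []).getD j 0 == 1)
def cntColZ (matrix : List (List Int)) (n j : Nat) : Nat :=
  (List.range n).countP (fun i => !((matrix.getD i []).getD j 0 == 1))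

-- B's row sum of signs equals ones minus non-ones over the first m positions
lemma sum_sgn_take (l : List Int) (m : Nat) (hm : m ≤ l.length) :
    ((l.take m).map pvSign).sum =
      ((List.range m).countP (fun j => l.getD j 0 == 1) : Int)
      - (List.range m).countP (fun j => !(l.getD j 0 == 1)) := by
  induction m with
  | zero => simp
  | succ m ih =>
    have hm' : m ≤ l.length := by omega
    have hml : m < l.length := by omega
    rw [List.take_add_one, List.range_succ, List.countP_append, List.countP_append,
      List.map_append, List.sum_append, ih hm']
    have hget : l[m]? = some l[m] := List.getElem?_eq_getElem hml
    by_cases h : l[m] = 1 <;>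
      simp [List.getD_eq_getElem?_getD, hget, h, pvSign] <;> ring

-- B's column sum of signs equals ones minus non-ones down the column
lemma sum_sgn_col (matrix : List (List Int)) (j : Nat) :
    (matrix.map (fun r => pvSign (r.getD j 0))).sum =
      ((List.range matrix.length).countP (fun i => (matrix.getD i []).getD j 0 == 1) : Int)
      - (List.range matrix.length).countP (fun i => !((matrix.getD i []).getD j 0 == 1)) := by
  induction matrix with
  | nil => simp
  | cons r t ih =>
    simp only [List.map_cons, List.sum_cons, List.length_cons, List.range_succ_eq_map,
      List.countP_cons, List.countP_map]
    have h1 : List.countP ((fun i => ((r :: t)[i]?.getD [])[j]?.getD 0 == 1) ∘ Nat.succ)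
          (List.range t.length)
        = List.countP (fun i => (t[i]?.getD [])[j]?.getD 0 == 1) (List.range t.length) := by
      apply List.countP_congr; intro a _; simp [Function.comp]
    have h2 : List.countP ((fun i => !((r :: t)[i]?.getD [])[j]?.getD 0 == 1) ∘ Nat.succ)
          (List.range t.length)
        = List.countP (fun i => !((t[i]?.getD [])[j]?.getD 0 == 1)) (List.range t.length) := by
      apply List.countP_congr; intro a _; simp [Function.comp]
    simp only [List.getD_eq_getElem?_getD] at ih ⊢
    rw [h1, h2, ih]
    by_cases h : r[j]?.getD 0 = 1 <;> simp [pvSign, h] <;> ring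

lemma getD_set (l : List Int) (i k : Nat) (a : Int) (hi : i < l.length) :
    (l.set i a).getD k 0 = if k = i then a else l.getD k 0 := by
  rcases eq_or_ne k i with rfl | hk
  · simp [List.getD_eq_getElem?_getD, hi]
  · simp [List.getD_eq_getElem?_getD, List.getElem?_set_ne (Ne.symm hk), hk]
lemma cntRow_succ (matrix : List (List Int)) (m i : Nat) :
    cntRow matrix (m+1) i = cntRow matrix m i + (if (matrix.getD i []).getD m 0 = 1 then 1 else 0) := by
  simp [cntRow, List.range_succ, List.countP_append]
lemma cntRowZ_succ (matrix : List (List Int)) (m i : Nat) :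
    cntRowZ matrix (m+1) i = cntRowZ matrix m i + (if (matrix.getD i []).getD m 0 = 1 then 0 else 1) := by
  by_cases h : (matrix.getD i []).getD m 0 = 1 <;>
    simp [cntRowZ, List.range_succ, List.countP_append]

lemma innerLem (matrix : List (List Int)) (i : Nat) (m : Nat) (ro rz co cz : List Int)
    (hro : i < ro.length) (hrz : i < rz.length)
    (hco : m ≤ co.length) (hcz : m ≤ cz.length) :
    (((List.range m).foldl (pvStepA matrix i) (ro, rz, co, cz)).1.length = ro.length ∧
     ((List.range m).foldl (pvStepA matrix i) (ro, rz, co, cz)).2.1.length = rz.length ∧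
     ((List.range m).foldl (pvStepA matrix i) (ro, rz, co, cz)).2.2.1.length = co.length ∧
     ((List.range m).foldl (pvStepA matrix i) (ro, rz, co, cz)).2.2.2.length = cz.length) ∧
    (∀ k, ((List.range m).foldl (pvStepA matrix i) (ro, rz, co, cz)).1.getD k 0 =
        ro.getD k 0 + if k = i then (cntRow matrix m i : Int) else 0) ∧
    (∀ k, ((List.range m).foldl (pvStepA matrix i) (ro, rz, co, cz)).2.1.getD k 0 =
        rz.getD k 0 + if k = i then (cntRowZ matrix m i : Int) else 0) ∧
    (∀ k, ((List.range m).foldl (pvStepA matrix i) (ro, rz, co, cz)).2.2.1.getD k 0 =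
        co.getD k 0 + if k < m ∧ (matrix.getD i []).getD k 0 = 1 then 1 else 0) ∧
    (∀ k, ((List.range m).foldl (pvStepA matrix i) (ro, rz, co, cz)).2.2.2.getD k 0 =
        cz.getD k 0 + if k < m ∧ ¬(matrix.getD i []).getD k 0 = 1 then 1 else 0) := by
  induction m with
  | zero => simp [cntRow, cntRowZ]
  | succ m ih =>
    obtain ⟨⟨L1, L2, L3, L4⟩, Hro, Hrz, Hco, Hcz⟩ :=
      ih (Nat.le_of_succ_le hco) (Nat.le_of_succ_le hcz)
    rw [List.range_succ, List.foldl_append]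
    set F := (List.range m).foldl (pvStepA matrix i) (ro, rz, co, cz) with hF
    simp only [List.foldl_cons, List.foldl_nil]
    by_cases h : (matrix.getD i []).getD m 0 = 1
    · simp only [pvStepA, if_pos h]
      refine ⟨⟨by simp [L1], L2, by simp [L3], L4⟩, ?_, ?_, ?_, ?_⟩
      · intro k
        rw [getD_set _ _ _ _ (by omega), cntRow_succ, if_pos h]
        rcases eq_or_ne k i with rfl | hk
        · rw [if_pos rfl, if_pos rfl, Hro k, if_pos rfl]; push_cast; ring
        · rw [if_neg hk, if_neg hk, Hro k, if_neg hk]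
      · intro k
        rw [Hrz k, cntRowZ_succ, if_pos h]
        rcases eq_or_ne k i with rfl | hk
        · rw [if_pos rfl, if_pos rfl]; push_cast; ring
        · rw [if_neg hk, if_neg hk]
      · intro k
        rw [getD_set _ _ _ _ (by omega)]
        rcases eq_or_ne k m with rfl | hk
        · rw [if_pos rfl, Hco k, if_neg (by omega), if_pos ⟨Nat.lt_succ_self k, h⟩]; ring
        · rw [if_neg hk, Hco k]
          have hiff : (k < m + 1 ∧ (matrix.getD i []).getD k 0 = 1) ↔
              (k < m ∧ (matrix.getD i []).getD k 0 = 1) := by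
            constructor <;> rintro ⟨c, p⟩ <;> exact ⟨by omega, p⟩
          rw [if_congr hiff rfl rfl]
      · intro k
        rw [Hcz k]
        have hiff : (k < m + 1 ∧ ¬(matrix.getD i []).getD k 0 = 1) ↔
            (k < m ∧ ¬(matrix.getD i []).getD k 0 = 1) := by
          constructor
          · rintro ⟨c, p⟩
            refine ⟨?_, p⟩
            rcases Nat.lt_succ_iff_lt_or_eq.1 c with hlt | rfl
            · exact hlt
            · exact absurd h p
          · rintro ⟨c, p⟩; exact ⟨by omega, p⟩
        rw [if_congr hiff rfl rfl]
    · simp only [pvStepA, if_neg h]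
      refine ⟨⟨L1, by simp [L2], L3, by simp [L4]⟩, ?_, ?_, ?_, ?_⟩
      · intro k
        rw [Hro k, cntRow_succ, if_neg h]
        rcases eq_or_ne k i with rfl | hk
        · rw [if_pos rfl, if_pos rfl]; push_cast; ring
        · rw [if_neg hk, if_neg hk]
      · intro k
        rw [getD_set _ _ _ _ (by omega), cntRowZ_succ, if_neg h]
        rcases eq_or_ne k i with rfl | hk
        · rw [if_pos rfl, if_pos rfl, Hrz k, if_pos rfl]; push_cast; ring
        · rw [if_neg hk, if_neg hk, Hrz k, if_neg hk]
      · intro k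
        rw [Hco k]
        have hiff : (k < m + 1 ∧ (matrix.getD i []).getD k 0 = 1) ↔
            (k < m ∧ (matrix.getD i []).getD k 0 = 1) := by
          constructor
          · rintro ⟨c, p⟩
            refine ⟨?_, p⟩
            rcases Nat.lt_succ_iff_lt_or_eq.1 c with hlt | rfl
            · exact hlt
            · exact absurd p h
          · rintro ⟨c, p⟩; exact ⟨by omega, p⟩
        rw [if_congr hiff rfl rfl]
      · intro k
        rw [getD_set _ _ _ _ (by omega)]
        rcases eq_or_ne k m with rfl | hk
        · rw [if_pos rfl, Hcz k, if_neg (by omega), if_pos ⟨Nat.lt_succ_self k, h⟩]; ring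
        · rw [if_neg hk, Hcz k]
          have hiff : (k < m + 1 ∧ ¬(matrix.getD i []).getD k 0 = 1) ↔
              (k < m ∧ ¬(matrix.getD i []).getD k 0 = 1) := by
            constructor <;> rintro ⟨c, p⟩ <;> exact ⟨by omega, p⟩
          rw [if_congr hiff rfl rfl]

lemma cntCol_succ (matrix : List (List Int)) (n j : Nat) :
    cntCol matrix (n+1) j = cntCol matrix n j + (if (matrix.getD n []).getD j 0 = 1 then 1 else 0) := by
  simp [cntCol, List.range_succ, List.countP_append]
lemma cntColZ_succ (matrix : List (List Int)) (n j : Nat) :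
    cntColZ matrix (n+1) j = cntColZ matrix n j + (if (matrix.getD n []).getD j 0 = 1 then 0 else 1) := by
  by_cases h : (matrix.getD n []).getD j 0 = 1 <;>
    simp [cntColZ, List.range_succ, List.countP_append]

lemma outerLem (matrix : List (List Int)) (C : Nat)
    (n : Nat) (hn : n ≤ matrix.length) :
    (((List.range n).foldl (fun s i => (List.range C).foldl (pvStepA matrix i) s)
        (List.replicate matrix.length (0:Int), List.replicate matrix.length (0:Int),
         List.replicate C (0:Int), List.replicate C (0:Int))).1.length = matrix.length ∧
     ((List.range n).foldl (fun s i => (List.range C).foldl (pvStepA matrix i) s)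
        (List.replicate matrix.length (0:Int), List.replicate matrix.length (0:Int),
         List.replicate C (0:Int), List.replicate C (0:Int))).2.1.length = matrix.length ∧
     ((List.range n).foldl (fun s i => (List.range C).foldl (pvStepA matrix i) s)
        (List.replicate matrix.length (0:Int), List.replicate matrix.length (0:Int),
         List.replicate C (0:Int), List.replicate C (0:Int))).2.2.1.length = C ∧
     ((List.range n).foldl (fun s i => (List.range C).foldl (pvStepA matrix i) s)
        (List.replicate matrix.length (0:Int), List.replicate matrix.length (0:Int),
         List.replicate C (0:Int), List.replicate C (0:Int))).2.2.2.length = C) ∧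
    (∀ k, ((List.range n).foldl (fun s i => (List.range C).foldl (pvStepA matrix i) s)
        (List.replicate matrix.length (0:Int), List.replicate matrix.length (0:Int),
         List.replicate C (0:Int), List.replicate C (0:Int))).1.getD k 0 =
        if k < n then (cntRow matrix C k : Int) else 0) ∧
    (∀ k, ((List.range n).foldl (fun s i => (List.range C).foldl (pvStepA matrix i) s)
        (List.replicate matrix.length (0:Int), List.replicate matrix.length (0:Int),
         List.replicate C (0:Int), List.replicate C (0:Int))).2.1.getD k 0 =
        if k < n then (cntRowZ matrix C k : Int) else 0) ∧
    (∀ j, j < C → ((List.range n).foldl (fun s i => (List.range C).foldl (pvStepA matrix i) s)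
        (List.replicate matrix.length (0:Int), List.replicate matrix.length (0:Int),
         List.replicate C (0:Int), List.replicate C (0:Int))).2.2.1.getD j 0 =
        (cntCol matrix n j : Int)) ∧
    (∀ j, j < C → ((List.range n).foldl (fun s i => (List.range C).foldl (pvStepA matrix i) s)
        (List.replicate matrix.length (0:Int), List.replicate matrix.length (0:Int),
         List.replicate C (0:Int), List.replicate C (0:Int))).2.2.2.getD j 0 =
        (cntColZ matrix n j : Int)) := by
  induction n with
  | zero =>
    simp [cntCol, cntColZ]
  | succ n ih =>
    obtain ⟨⟨L1, L2, L3, L4⟩, Hro, Hrz, Hco, Hcz⟩ := ih (by omega)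
    rw [List.range_succ, List.foldl_append]
    set S := (List.range n).foldl (fun s i => (List.range C).foldl (pvStepA matrix i) s)
        (List.replicate matrix.length (0:Int), List.replicate matrix.length (0:Int),
         List.replicate C (0:Int), List.replicate C (0:Int)) with hS
    simp only [List.foldl_cons, List.foldl_nil]
    obtain ⟨⟨M1, M2, M3, M4⟩, Gro, Grz, Gco, Gcz⟩ :=
      innerLem matrix n C S.1 S.2.1 S.2.2.1 S.2.2.2 (by omega) (by omega) (by omega) (by omega)
    have hSt : (S.1, S.2.1, S.2.2.1, S.2.2.2) = S := rfl
    rw [hSt] at M1 M2 M3 M4 Gro Grz Gco Gcz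
    refine ⟨⟨by omega, by omega, by omega, by omega⟩, ?_, ?_, ?_, ?_⟩
    · intro k
      rw [Gro k, Hro k]
      rcases eq_or_ne k n with rfl | hk
      · rw [if_neg (by omega), if_pos rfl, if_pos (by omega)]; ring
      · by_cases hkn : k < n
        · rw [if_pos hkn, if_neg hk, if_pos (by omega)]; ring
        · rw [if_neg hkn, if_neg hk, if_neg (by omega)]; ring
    · intro k
      rw [Grz k, Hrz k]
      rcases eq_or_ne k n with rfl | hk
      · rw [if_neg (by omega), if_pos rfl, if_pos (by omega)]; ring
      · by_cases hkn : k < n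
        · rw [if_pos hkn, if_neg hk, if_pos (by omega)]; ring
        · rw [if_neg hkn, if_neg hk, if_neg (by omega)]; ring
    · intro j hj
      rw [Gco j, Hco j hj, cntCol_succ]
      by_cases hp : (matrix.getD n []).getD j 0 = 1
      · rw [if_pos ⟨hj, hp⟩, if_pos hp]; push_cast; ring
      · rw [if_neg (by rintro ⟨_, p⟩; exact hp p), if_neg hp]; push_cast; ring
    · intro j hj
      rw [Gcz j, Hcz j hj, cntColZ_succ]
      by_cases hp : (matrix.getD n []).getD j 0 = 1
      · rw [if_neg (by rintro ⟨_, p⟩; exact p hp), if_pos hp]; push_cast; ring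
      · rw [if_pos ⟨hj, hp⟩, if_neg hp]; push_cast; ring

-- ===== VERDICT (by name: the statement is the Claim_ definition above) =====
theorem differenceOnesZeros_spec : Claim_equal_differenceOnesZeros := by
  intro matrix _ hpre
  unfold Spec_differenceOnesZeros
  unfold differenceOnesZeros differenceOnesZeros_alt
  obtain ⟨⟨L1, L2, L3, L4⟩, Hro, Hrz, Hco, Hcz⟩ :=
    outerLem matrix (matrix.getD 0 []).length matrix.length (le_refl _)
  apply List.ext_getElem
  · simp
  intro i h1 h2
  simp only [List.getElem_map, List.getElem_range]
  have hi : i < matrix.length := by simpa using h2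
  apply List.map_congr_left
  intro j hj
  rw [List.mem_range] at hj
  rw [Hro i, Hrz i, Hco j hj, Hcz j hj, if_pos hi, if_pos hi]
  have hrowlen : (matrix.getD 0 []).length ≤ matrix[i].length :=
    hpre.2 _ (List.getElem_mem hi)
  have hrow : ((matrix[i].take (matrix.getD 0 []).length).map pvSign).sum =
      (cntRow matrix (matrix.getD 0 []).length i : Int) - cntRowZ matrix (matrix.getD 0 []).length i := by
    rw [sum_sgn_take _ _ hrowlen]
    simp [cntRow, cntRowZ, List.getD_eq_getElem?_getD, List.getElem?_eq_getElem hi]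
  have hcol : (matrix.map (fun r => pvSign (r.getD j 0))).sum =
      (cntCol matrix matrix.length j : Int) - cntColZ matrix matrix.length j := by
    rw [sum_sgn_col]
    simp [cntCol, cntColZ]
  rw [hrow, hcol]
  ring
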